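/- GENERATED by mk_final_copies.py from the proof of the farm's unit `codebook_decode_deinterleave_repeat.2d` (farm:codebook_decode_deinterleave_repeat.2d.1: Proof.lean) as the
   re-elaboration sweep compiled it — do not edit. -/
import Asan.CheckWalk
import Vorbis.Spec.ReaderLemmas
import Vorbis.Spec.Units.codebook_decode_deinterleave_repeat_2d
import Vorbis.Spec.Worked.codebook_decode_deinterleave_repeat_2d_Lemmas

open X86 X86.User Asan Vorbis Vorbis.Spec Vorbis.Spec.Deint

set_option maxRecDepth 4000
set_option maxHeartbeats 4000000

/-- **Segment .2d of `codebook_decode_deinterleave_repeat`, 10DECFH … 10DF2BH** (C lines 1907, 1917 – 1918, 1936 – 1937, 1946): from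
`At2d` (the loop invariant inside a round, r14d = the DECODE_RAW result `z`) to the `z < 0` handler (`At2c`), to FIX 10's
`return FALSE` (`AtFalse2`, cut12), or — after the clamp of `effective` and `z *= c->dimensions` — to one of the two arms (`AtSeq`
cut6, `AtPlain` cut7). Two check sites (load4 `c->dimensions`, load1 `c->sequence_p`: fields of the struct at `c`), no call. The
only stores are the return addresses of the two check calls at `[rsp−8]` and the slot `[rsp+4]`: `common_frame`. -/
theorem Vorbis.Spec.Worked.codebook_decode_deinterleave_repeat_2d_ok : Vorbis.Spec.codebook_decode_deinterleave_repeat_2d.Statement := by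
  intro Lay hLay μ hμ u₀ hcode h_load1 h_load4 others frames Blk len ret e u ci pi eff td hat
  obtain ⟨hrip, ⟨hcom, hloc, hinv, htd⟩, hz⟩ := hat
  have hcom' := hcom
  obtain ⟨hmid, hpre, hreader, hcb, hapart, hbook, htype2, hc, chSlot, outsSlot, fSlot, cpSlot, ppSlot, lenSlot, htable, hcInt,
    hpInt⟩ := hcom'
  obtain ⟨he, hrsp, hra, h15, h14, h13, h12, hbp, hbx, hsame, hcodeok, habi, hun⟩ := hmid
  have hloc' := hloc
  obtain ⟨ciReg, piSlot, effReg, tdSlot⟩ := hloc'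
  v_entry he
  have g : DeintGeo e := DeintGeo.of_pre hpre he_room
  have hdf := habi.1
  have hmx := habi.2
  have hsse := Vorbis.sseOK_of_abiInv habi
  have w_eq : Mem.EqOn Vorbis.L.textLo Vorbis.L.textHi u₀.mem u.mem := hcodeok
  have gf1 := g.f_st
  have gf2 := g.f_lo
  have gf3 := g.f_hi
  simp only [fOf] at gf1 gf2 gf3
  -- where the struct at `c` is; its live block
  have gc1 := g.c_st
  have gc2 := g.c_lo
  have gc3 := g.c_hi
  simp only [cOf] at gc1 gc2 gc3
  have hL := hpre.book.reader.env.live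
  obtain ⟨B, hB, hBin⟩ := hpre.book.book
  -- the numbers of the clamp: nothing wraps 32 bits
  have hch2 : chOf e ≤ 16 := hpre.ch_le
  have hlen : lenOf e ≤ 4096 := hpre.len_le
  have hlim : lenOf e * chOf e ≤ 65536 := Res.len_mul_ch_le hlen hch2
  have hpos : pi * chOf e + ci ≤ lenOf e * chOf e := hinv.inter.pos_le
  have hd1 : 1 ≤ Codebook.dimensions e.mem (e.reg .rsi).toNat := hpre.book.cb.K1.dim_pos
  have hd2 : Codebook.dimensions e.mem (e.reg .rsi).toNat ≤ 65535 := hpre.book.cb.K1.dim_le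
  have hD : dimOf e ≤ 65535 := by
    simp only [dimOf, cOf]
    omega
  have heff1 : 1 ≤ eff := hinv.eff_pos
  have heff2 : eff ≤ dimOf e := hinv.eff_le
  -- the load of `c->dimensions` (10DF05H): the walker reads it through the return address of the check call
  have hdimread : u.mem.readLE (e.reg .rsi) 4 = dimOf e := by
    have hd := hbook.dimensions
    have hcs := u.mem.i32_cases (e.reg .rsi).toNat
    have e4 : u.mem.readLE (e.reg .rsi) 4 = u.mem.u32 (e.reg .rsi).toNat := by
      unfold Mem.u32
      rw [addr_toNat]
    rw [e4]
    show u.mem.u32 (e.reg .rsi).toNat = (Codebook.dimensions e.mem (e.reg .rsi).toNat).toNat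
    simp only [vacc, voff, Nat.add_zero, cOf] at hd1 hd2 hd ⊢
    omega
  have htE : Codebook.lookup_type e.mem (cOf e) = 2 := by
    rw [← hbook.lookup_type]
    exact htype2
  u_walk hcode [hμ.vendor] until [Vorbis.L.codebook_decode_deinterleave_repeat.at_10dc5c,
    Vorbis.L.codebook_decode_deinterleave_repeat.cut12, Vorbis.L.codebook_decode_deinterleave_repeat.cut6,
    Vorbis.L.codebook_decode_deinterleave_repeat.cut7] span [Vorbis.L.textLo, Vorbis.L.textHi] side (v_side)
  · -- 10DF00H, line 1936 `c->dimensions` (the clamp not taken): a field of the struct at `c`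
    have hun1 : ShadowUntouched u.mem s_10df00.mem := by v_untouched
    have hs : Site (Live (stackObjs frames ++ others)) ((e.reg .rsi).toNat + 0) 4 :=
      Codebook.site_field hL hB hBin 0 4 (by decide) (by decide) rfl
    exact check_site hpre.args (hun.trans hun1) hs rfl
  · -- 10DF0FH, line 1937 `c->sequence_p`
    have hun1 : ShadowUntouched u.mem s_10df0f.mem := by v_untouched
    have hs : Site (Live (stackObjs frames ++ others)) ((e.reg .rsi).toNat + 26) 1 :=
      Codebook.site_field hL hB hBin 26 1 (by decide) (by decide) rfl
    exact check_site hpre.args (hun.trans hun1) hs (by u_omega)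
  · -- 10DF00H again (the clamp taken)
    have hun1 : ShadowUntouched u.mem s_10df00.mem := by v_untouched
    have hs : Site (Live (stackObjs frames ++ others)) ((e.reg .rsi).toNat + 0) 4 :=
      Codebook.site_field hL hB hBin 0 4 (by decide) (by decide) rfl
    exact check_site hpre.args (hun.trans hun1) hs rfl
  · -- 10DF0FH again
    have hun1 : ShadowUntouched u.mem s_10df0f.mem := by v_untouched
    have hs : Site (Live (stackObjs frames ++ others)) ((e.reg .rsi).toNat + 26) 1 :=
      Codebook.site_field hL hB hBin 26 1 (by decide) (by decide) rfl
    exact check_site hpre.args (hun.trans hun1) hs (by u_omega)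
  · -- 10DC5CH (`js`: `z < 0`) → `At2c`: nothing was written
    have hs : Mem.SameExcept [⟨(e.reg .rsp).toNat - 496, (e.reg .rsp).toNat - 96⟩] u.mem s_10ded2.mem := by
      rw [w_mem]
      exact Mem.SameExcept.refl _ _
    have hab : abiInv s_10ded2 := by
      refine Vorbis.abiInv_of ?_ ?_
      · rw [w_flags]
        simp only [X86.User.df_setStatus]
        exact hdf
      · rw [w_mxcsr]
        exact hmx
    refine ReachVia.done (Or.inl ⟨w_rip, ?_⟩)
    exact Vorbis.Spec.codebook_decode_deinterleave_repeat_2d.common_frame hcom g hs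
      ((w_kept .rsp rfl).trans hrsp) (w_kept .r12 rfl) hab
  · -- 10DD59H (cut6; the clamp not taken, `sequence_p ≠ 0`) → `AtSeq` with `effective' = effective`
    rw [Vorbis.Spec.codebook_decode_deinterleave_repeat_2d.pos_bv, Vorbis.Spec.codebook_decode_deinterleave_repeat_2d.lim_bv]
      at hbr_10def2
    have hroom : pi * chOf e + ci + eff ≤ lenOf e * chOf e :=
      (Vorbis.Spec.codebook_decode_deinterleave_repeat_2d.clamp_cmp _ _ _ (by omega) hlim (by omega)).mp hbr_10def2
    obtain ⟨hz1, hz2⟩ := Vorbis.Spec.codebook_decode_deinterleave_repeat_2d.z_facts (u.reg .r14) hpre.book.cb htE hz hbr_10ded2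
    have hs : Mem.SameExcept [⟨(e.reg .rsp).toNat - 496, (e.reg .rsp).toNat - 96⟩] u.mem s_10df1a.mem := by
      u_same
    have hab : abiInv s_10df1a := by
      refine Vorbis.abiInv_of ?_ ?_
      · rw [w_flags]
        simp only [X86.User.df_setStatus]
        exact w_df_10df0f
      · rw [w_mxcsr]
        exact hmx
    refine ReachVia.done (Or.inr (Or.inr (Or.inl ⟨eff, (Word.part .w32 (u.reg .r14)).toNat * dimOf e, w_rip, ?_, ?_, ?_, ?_⟩)))
    · exact Vorbis.Spec.codebook_decode_deinterleave_repeat_2d.common_frame hcom g hs w_rsp (w_kept .r12 rfl) hab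
    · exact Vorbis.Spec.codebook_decode_deinterleave_repeat_2d.locals_frame hloc g hs (w_kept .rbp rfl)
        ((w_kept .r15 rfl).trans effReg)
    · rw [w_r14, Vorbis.Spec.codebook_decode_deinterleave_repeat_2d.zdim_bv, cnt32_ofBV _ (by omega)]
    · exact Vorbis.Spec.codebook_decode_deinterleave_repeat_2d.round_of hinv htd heff1 (Nat.le_refl _) hroom hz1
  · -- 10DD70H (cut7; the clamp not taken, `sequence_p = 0`) → `AtPlain`: `[rsp+4] = z·dimensions`, `i = 0`
    rw [Vorbis.Spec.codebook_decode_deinterleave_repeat_2d.pos_bv, Vorbis.Spec.codebook_decode_deinterleave_repeat_2d.lim_bv] at hbr_10def2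
    have hroom : pi * chOf e + ci + eff ≤ lenOf e * chOf e :=
      (Vorbis.Spec.codebook_decode_deinterleave_repeat_2d.clamp_cmp _ _ _ (by omega) hlim (by omega)).mp hbr_10def2
    obtain ⟨hz1, hz2⟩ := Vorbis.Spec.codebook_decode_deinterleave_repeat_2d.z_facts (u.reg .r14) hpre.book.cb htE hz hbr_10ded2
    have hs : Mem.SameExcept [⟨(e.reg .rsp).toNat - 496, (e.reg .rsp).toNat - 96⟩] u.mem s_10df2b.mem := by
      u_same
    have hab : abiInv s_10df2b := by
      refine Vorbis.abiInv_of ?_ ?_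
      · rw [w_flags]
        simp only [X86.User.df_setStatus]
        exact w_df_10df0f
      · rw [w_mxcsr]
        exact hmx
    refine ReachVia.done (Or.inr (Or.inr (Or.inr ⟨eff, (Word.part .w32 (u.reg .r14)).toNat * dimOf e, w_rip, ?_, ?_, ?_, ?_, ?_⟩)))
    · exact Vorbis.Spec.codebook_decode_deinterleave_repeat_2d.common_frame hcom g hs w_rsp (w_kept .r12 rfl) hab
    · exact Vorbis.Spec.codebook_decode_deinterleave_repeat_2d.locals_frame hloc g hs (w_kept .rbp rfl) ((w_kept .r15 rfl).trans effReg)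
    · -- the slot `[rsp+4]`, stored at 10DF26H
      u_resolve
      rw [Vorbis.Spec.codebook_decode_deinterleave_repeat_2d.zdim_bv, toNat_ofNat32 _ (by omega)]
      exact Nat.mod_eq_of_lt (by omega)
    · rw [w_r13]
      rfl
    · exact Vorbis.Spec.codebook_decode_deinterleave_repeat_2d.round_of hinv htd heff1 (Nat.le_refl _) hroom hz1
  · -- 10DF69H (cut12; FIX 10: the clamped `effective ≤ 0`) → `AtFalse2`: nothing was written
    have hs : Mem.SameExcept [⟨(e.reg .rsp).toNat - 496, (e.reg .rsp).toNat - 96⟩] u.mem s_10defb.mem := by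
      rw [w_mem]
      exact Mem.SameExcept.refl _ _
    have hab : abiInv s_10defb := by
      refine Vorbis.abiInv_of ?_ ?_
      · rw [w_flags]
        simp only [X86.User.df_setStatus]
        exact hdf
      · rw [w_mxcsr]
        exact hmx
    refine ReachVia.done (Or.inr (Or.inl ⟨w_rip, ?_⟩))
    exact Vorbis.Spec.codebook_decode_deinterleave_repeat_2d.common_frame hcom g hs ((w_kept .rsp rfl).trans hrsp) (w_kept .r12 rfl) hab
  · -- 10DD59H (cut6; the clamp taken, FIX 5, `sequence_p ≠ 0`) → `AtSeq` with `effective' = len·ch − pos`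
    rw [Vorbis.Spec.codebook_decode_deinterleave_repeat_2d.pos_bv, Vorbis.Spec.codebook_decode_deinterleave_repeat_2d.lim_bv] at hbr_10def2 hbr_10defb w_r15
    rw [Vorbis.Spec.codebook_decode_deinterleave_repeat_2d.clamp_cmp _ _ _ (by omega) hlim (by omega)] at hbr_10def2
    rw [Vorbis.Spec.codebook_decode_deinterleave_repeat_2d.clamp_sub _ _ hpos hlim] at hbr_10defb w_r15
    rw [Vorbis.Spec.codebook_decode_deinterleave_repeat_2d.clamp_test _ (by omega)] at hbr_10defb
    rw [cnt32_ofBV _ (by omega)] at w_r15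
    obtain ⟨hz1, hz2⟩ := Vorbis.Spec.codebook_decode_deinterleave_repeat_2d.z_facts (u.reg .r14) hpre.book.cb htE hz hbr_10ded2
    have hs : Mem.SameExcept [⟨(e.reg .rsp).toNat - 496, (e.reg .rsp).toNat - 96⟩] u.mem s_10df1a.mem := by
      u_same
    have hab : abiInv s_10df1a := by
      refine Vorbis.abiInv_of ?_ ?_
      · rw [w_flags]
        simp only [X86.User.df_setStatus]
        exact w_df_10df0f
      · rw [w_mxcsr]
        exact hmx
    refine ReachVia.done (Or.inr (Or.inr (Or.inl ⟨lenOf e * chOf e - (pi * chOf e + ci),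
      (Word.part .w32 (u.reg .r14)).toNat * dimOf e, w_rip, ?_, ?_, ?_, ?_⟩)))
    · exact Vorbis.Spec.codebook_decode_deinterleave_repeat_2d.common_frame hcom g hs w_rsp (w_kept .r12 rfl) hab
    · exact Vorbis.Spec.codebook_decode_deinterleave_repeat_2d.locals_frame hloc g hs (w_kept .rbp rfl) w_r15
    · rw [w_r14, Vorbis.Spec.codebook_decode_deinterleave_repeat_2d.zdim_bv, cnt32_ofBV _ (by omega)]
    · exact Vorbis.Spec.codebook_decode_deinterleave_repeat_2d.round_of hinv htd (by omega) (by omega) (by omega) hz1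
  · -- 10DD70H (cut7; the clamp taken, `sequence_p = 0`) → `AtPlain`
    rw [Vorbis.Spec.codebook_decode_deinterleave_repeat_2d.pos_bv, Vorbis.Spec.codebook_decode_deinterleave_repeat_2d.lim_bv] at hbr_10def2 hbr_10defb w_r15
    rw [Vorbis.Spec.codebook_decode_deinterleave_repeat_2d.clamp_cmp _ _ _ (by omega) hlim (by omega)] at hbr_10def2
    rw [Vorbis.Spec.codebook_decode_deinterleave_repeat_2d.clamp_sub _ _ hpos hlim] at hbr_10defb w_r15
    rw [Vorbis.Spec.codebook_decode_deinterleave_repeat_2d.clamp_test _ (by omega)] at hbr_10defb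
    rw [cnt32_ofBV _ (by omega)] at w_r15
    obtain ⟨hz1, hz2⟩ := Vorbis.Spec.codebook_decode_deinterleave_repeat_2d.z_facts (u.reg .r14) hpre.book.cb htE hz hbr_10ded2
    have hs : Mem.SameExcept [⟨(e.reg .rsp).toNat - 496, (e.reg .rsp).toNat - 96⟩] u.mem s_10df2b.mem := by
      u_same
    have hab : abiInv s_10df2b := by
      refine Vorbis.abiInv_of ?_ ?_
      · rw [w_flags]
        simp only [X86.User.df_setStatus]
        exact w_df_10df0f
      · rw [w_mxcsr]
        exact hmx
    refine ReachVia.done (Or.inr (Or.inr (Or.inr ⟨lenOf e * chOf e - (pi * chOf e + ci),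
      (Word.part .w32 (u.reg .r14)).toNat * dimOf e, w_rip, ?_, ?_, ?_, ?_, ?_⟩)))
    · exact Vorbis.Spec.codebook_decode_deinterleave_repeat_2d.common_frame hcom g hs w_rsp (w_kept .r12 rfl) hab
    · exact Vorbis.Spec.codebook_decode_deinterleave_repeat_2d.locals_frame hloc g hs (w_kept .rbp rfl) w_r15
    · -- the slot `[rsp+4]`, stored at 10DF26H
      u_resolve
      rw [Vorbis.Spec.codebook_decode_deinterleave_repeat_2d.zdim_bv, toNat_ofNat32 _ (by omega)]
      exact Nat.mod_eq_of_lt (by omega)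
    · rw [w_r13]
      rfl
    · exact Vorbis.Spec.codebook_decode_deinterleave_repeat_2d.round_of hinv htd (by omega) (by omega) (by omega) hz1
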